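-- pv_equiv track=rewrite | github.com/el-abni/aury | python/aury/sensitive_tokens.py | _host_extension
-- ===== SOURCE A (Python) =====
-- def _host_extension(token: str) -> str:
--     lower = token.lower()
--     for extension in ("tar.gz", "tar.bz2", "tar.xz"):
--         if lower.endswith(f".{extension}"):
--             return extension
--     parts = lower.rsplit(".", 1)
--     if len(parts) != 2:
--         return ""
--     return parts[1]
-- ===== SOURCE B (Python) =====
-- def _host_extension(token: str) -> str:
--     parts = token.lower().split('.')
--     if len(parts) >= 3 and parts[-2] == 'tar' and parts[-1] in ('gz', 'bz2', 'xz'):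
--         return 'tar.' + parts[-1]
--     if len(parts) >= 2:
--         return parts[-1]
--     return ''
-- ===== Notes on version B (the rewrite author's own statement) =====
-- stated objective: simpler
-- what changed: Replaces the endswith-loop over three fixed suffixes plus a separate rsplit with a single tokenization on '.' and inspection of the last two components.
import Mathlib
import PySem

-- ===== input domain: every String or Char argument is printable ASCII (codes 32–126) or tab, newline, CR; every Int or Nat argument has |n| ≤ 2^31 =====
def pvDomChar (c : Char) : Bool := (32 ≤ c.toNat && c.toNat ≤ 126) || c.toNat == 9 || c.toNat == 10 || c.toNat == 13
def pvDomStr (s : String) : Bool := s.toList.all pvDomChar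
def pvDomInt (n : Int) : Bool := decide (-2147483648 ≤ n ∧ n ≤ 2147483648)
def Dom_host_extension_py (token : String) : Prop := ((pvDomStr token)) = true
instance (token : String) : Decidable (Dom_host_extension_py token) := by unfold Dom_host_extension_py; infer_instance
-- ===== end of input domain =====

-- B replaces A's endswith-loop over three fixed suffixes plus rsplit by a single split on '.'
-- and inspection of the last two components (objective: simpler decomposition).

-- ===== PORT A =====
-- rsplit(".", 1) is not in PySem; it is hand-ported exactly: it splits at the LAST '.' if
-- there is one (parts has length 2), otherwise parts = [lower] (length 1, so "" is returned).
def host_extension_py (token : String) : String :=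
  let lower := PySem.Str.lower token
  if PySem.Str.endswith lower ".tar.gz" then "tar.gz"
  else if PySem.Str.endswith lower ".tar.bz2" then "tar.bz2"
  else if PySem.Str.endswith lower ".tar.xz" then "tar.xz"
  else
    let r := lower.toList.reverse
    if (r.dropWhile (· ≠ '.')).isEmpty then ""          -- no '.': len(parts) = 1 ≠ 2
    else String.ofList ((r.takeWhile (· ≠ '.')).reverse)    -- parts[1] = piece after the last '.'

-- ===== PORT B =====
-- split('.') is ported as List.splitOn '.' on the character list (exact: Python's str.split
-- with an explicit separator keeps empty pieces, as List.splitOn does).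
def host_extension_py_alt (token : String) : String :=
  let parts := (PySem.Str.lower token).toList.splitOn '.'
  if 3 ≤ parts.length ∧ parts.dropLast.getLastD [] = ['t','a','r'] ∧
      (parts.getLastD [] = ['g','z'] ∨ parts.getLastD [] = ['b','z','2'] ∨
       parts.getLastD [] = ['x','z'])
  then String.ofList ('t'::'a'::'r'::'.'::parts.getLastD [])
  else if 2 ≤ parts.length then String.ofList (parts.getLastD []) else ""

-- ===== PRECONDITION & SPEC =====
def Spec_host_extension_py (token : String) (out : String) : Prop := out = host_extension_py_alt token
instance (token : String) (out : String) : Decidable (Spec_host_extension_py token out) := by unfold Spec_host_extension_py; infer_instance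

-- ===== CLAIM (what is proved, stated in full; the proofs are below) =====
def Claim_equal_host_extension_py : Prop := ∀ (token : String), Dom_host_extension_py token → Spec_host_extension_py token (host_extension_py token)

-- ===== LEMMAS AND PROOFS =====

-- Uniqueness of the "last dot" decomposition.
theorem pvLastDotUniq (a : List Char) : ∀ (c : List Char) {b d : List Char},
    '.' ∉ b → '.' ∉ d → a ++ '.' :: b = c ++ '.' :: d → a = c ∧ b = d := by
  induction a with
  | nil =>
    intro c b d hb hd h
    cases c with
    | nil => simpa using h
    | cons y ys =>
      simp only [List.nil_append, List.cons_append, List.cons.injEq] at h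
      exact absurd (h.2 ▸ List.mem_append_right ys (List.mem_cons_self)) hb
  | cons x xs ih =>
    intro c b d hb hd h
    cases c with
    | nil =>
      simp only [List.nil_append, List.cons_append, List.cons.injEq] at h
      exact absurd (h.2.symm ▸ List.mem_append_right xs (List.mem_cons_self)) hd
    | cons y ys =>
      simp only [List.cons_append, List.cons.injEq] at h
      obtain ⟨h1, h2⟩ := ih ys hb hd h.2
      exact ⟨by rw [h.1, h1], h2⟩

theorem pvTakeWhileLast (xs ys : List Char) (h : '.' ∉ xs) :
    (xs ++ '.' :: ys).takeWhile (· ≠ '.') = xs := by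
  induction xs with
  | nil => simp
  | cons x t ih =>
    have hx : x ≠ '.' := fun he => h (he ▸ List.mem_cons_self)
    have ih' := ih (fun hm => h (List.mem_cons_of_mem _ hm))
    simp only [List.cons_append, List.takeWhile_cons]
    simp only [ne_eq, decide_not] at ih' ⊢
    simp [hx, ih']

theorem pvDropWhileLast (xs ys : List Char) (h : '.' ∉ xs) :
    (xs ++ '.' :: ys).dropWhile (· ≠ '.') = '.' :: ys := by
  induction xs with
  | nil => simp
  | cons x t ih =>
    have hx : x ≠ '.' := fun he => h (he ▸ List.mem_cons_self)
    have ih' := ih (fun hm => h (List.mem_cons_of_mem _ hm))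
    simp only [List.cons_append, List.dropWhile_cons]
    simp only [ne_eq, decide_not] at ih' ⊢
    simp [hx, ih']

theorem pvSplitOnNoDot (l : List Char) (h : '.' ∉ l) : l.splitOn '.' = [l] := by
  simp only [List.splitOn]
  refine List.splitOnP_eq_single _ _ ?_
  intro x hx hb
  rw [beq_iff_eq] at hb
  subst hb
  exact h hx

theorem pvSplitOnLast (init tail : List Char) (h : '.' ∉ tail) :
    (init ++ '.' :: tail).splitOn '.' = init.splitOn '.' ++ [tail] := by
  simp only [List.splitOn]
  rw [List.splitOnP_append_cons _ init tail '.' (by simp)]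
  rw [show List.splitOnP (· == '.') tail = [tail] from
    List.splitOnP_eq_single _ _ (by
      intro x hx hb
      rw [beq_iff_eq] at hb
      subst hb
      exact h hx)]

theorem pvExistsLastDot (l : List Char) (h : '.' ∈ l) :
    ∃ init tail, l = init ++ '.' :: tail ∧ '.' ∉ tail := by
  induction l with
  | nil => cases h
  | cons x xs ih =>
    by_cases hx : '.' ∈ xs
    · obtain ⟨i, t, he, ht⟩ := ih hx
      exact ⟨x :: i, t, by rw [he]; rfl, ht⟩
    · have hx' : x = '.' := by
        rcases List.mem_cons.1 h with h1 | h1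
        · exact h1.symm
        · exact absurd h1 hx
      exact ⟨[], xs, by simp [hx'], hx⟩

-- suffix test against ".tar." ++ e, in terms of the last-dot decomposition
theorem pvSuffixIff (i2 t2 tail e : List Char) (h2 : '.' ∉ t2) (ht : '.' ∉ tail) (he : '.' ∉ e) :
    ((['.','t','a','r'] ++ '.' :: e) <:+ ((i2 ++ '.' :: t2) ++ '.' :: tail)) ↔
      (t2 = ['t','a','r'] ∧ tail = e) := by
  constructor
  · rintro ⟨x, hx⟩
    rw [show x ++ (['.','t','a','r'] ++ '.' :: e) = (x ++ ['.','t','a','r']) ++ '.' :: e by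
      simp] at hx
    obtain ⟨h1, h2'⟩ := pvLastDotUniq (x ++ ['.','t','a','r']) (i2 ++ '.' :: t2) he ht hx
    have h3 : x ++ '.' :: ['t','a','r'] = i2 ++ '.' :: t2 := by simpa using h1
    obtain ⟨_, h4⟩ := pvLastDotUniq x i2 (by decide) h2 h3
    exact ⟨h4.symm, h2'.symm⟩
  · rintro ⟨rfl, rfl⟩
    exact ⟨i2, by simp⟩

theorem pvSuffixFalse (init tail e : List Char) (hi : '.' ∉ init) (ht : '.' ∉ tail)
    (he : '.' ∉ e) : ¬ ((['.','t','a','r'] ++ '.' :: e) <:+ (init ++ '.' :: tail)) := by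
  rintro ⟨x, hx⟩
  rw [show x ++ (['.','t','a','r'] ++ '.' :: e) = (x ++ ['.','t','a','r']) ++ '.' :: e by
    simp] at hx
  obtain ⟨h1, _⟩ := pvLastDotUniq (x ++ ['.','t','a','r']) init he ht hx
  exact hi (h1 ▸ List.mem_append_right x (by decide))

-- the whole comparison, at the character-list level
theorem pvMain (l : List Char) :
    (if (['.','t','a','r','.','g','z'] : List Char).isSuffixOf l then "tar.gz"
     else if (['.','t','a','r','.','b','z','2'] : List Char).isSuffixOf l then "tar.bz2"
     else if (['.','t','a','r','.','x','z'] : List Char).isSuffixOf l then "tar.xz"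
     else if (l.reverse.dropWhile (· ≠ '.')).isEmpty then ""
     else String.ofList ((l.reverse.takeWhile (· ≠ '.')).reverse)) =
    (if 3 ≤ (l.splitOn '.').length ∧ (l.splitOn '.').dropLast.getLastD [] = ['t','a','r'] ∧
        ((l.splitOn '.').getLastD [] = ['g','z'] ∨ (l.splitOn '.').getLastD [] = ['b','z','2'] ∨
         (l.splitOn '.').getLastD [] = ['x','z'])
     then String.ofList ('t'::'a'::'r'::'.'::(l.splitOn '.').getLastD [])
     else if 2 ≤ (l.splitOn '.').length then String.ofList ((l.splitOn '.').getLastD []) else "") := by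
  by_cases hdot : '.' ∈ l
  · obtain ⟨init, tail, rfl, ht⟩ := pvExistsLastDot l hdot
    have ht' : '.' ∉ tail.reverse := by simpa using ht
    have htw := pvTakeWhileLast tail.reverse init.reverse ht'
    have hdw := pvDropWhileLast tail.reverse init.reverse ht'
    have hrev : (init ++ '.' :: tail).reverse = tail.reverse ++ '.' :: init.reverse := by simp
    have hsplit := pvSplitOnLast init tail ht
    by_cases hdi : '.' ∈ init
    · obtain ⟨i2, t2, rfl, ht2⟩ := pvExistsLastDot init hdi
      have hsplit2 := pvSplitOnLast i2 t2 ht2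
      have hne : i2.splitOn '.' ≠ [] := by
        simp only [List.splitOn]; exact List.splitOnP_ne_nil _ _
      have hlen : 1 ≤ (i2.splitOn '.').length := List.length_pos_iff.2 hne
      have egz : ((['.','t','a','r','.','g','z'] : List Char) <:+ (i2 ++ '.' :: t2) ++ '.' :: tail) ↔
          (t2 = ['t','a','r'] ∧ tail = ['g','z']) := by
        simpa using pvSuffixIff i2 t2 tail ['g','z'] ht2 ht (by decide)
      have ebz : ((['.','t','a','r','.','b','z','2'] : List Char) <:+ (i2 ++ '.' :: t2) ++ '.' :: tail) ↔
          (t2 = ['t','a','r'] ∧ tail = ['b','z','2']) := by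
        simpa using pvSuffixIff i2 t2 tail ['b','z','2'] ht2 ht (by decide)
      have exz : ((['.','t','a','r','.','x','z'] : List Char) <:+ (i2 ++ '.' :: t2) ++ '.' :: tail) ↔
          (t2 = ['t','a','r'] ∧ tail = ['x','z']) := by
        simpa using pvSuffixIff i2 t2 tail ['x','z'] ht2 ht (by decide)
      simp only [List.isSuffixOf_iff_suffix, egz, ebz, exz, hsplit, hsplit2, hrev, htw, hdw,
        List.dropLast_concat, List.getLastD_concat, List.length_append, List.isEmpty_cons,
        List.reverse_reverse]
      by_cases h1 : t2 = ['t','a','r'] <;> by_cases h2 : tail = ['g','z'] <;>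
        by_cases h3 : tail = ['b','z','2'] <;> by_cases h4 : tail = ['x','z'] <;>
        simp_all <;> rfl
    · have egz := pvSuffixFalse init tail ['g','z'] hdi ht (by decide)
      have ebz := pvSuffixFalse init tail ['b','z','2'] hdi ht (by decide)
      have exz := pvSuffixFalse init tail ['x','z'] hdi ht (by decide)
      have hs2 := pvSplitOnNoDot init hdi
      simp only [List.isSuffixOf_iff_suffix, hsplit, hs2, hrev, htw, hdw,
        List.dropLast_concat, List.getLastD_concat, List.isEmpty_cons, List.reverse_reverse]
      simp only [show ∀ e : List Char, (['.','t','a','r'] ++ '.' :: e) = '.'::'t'::'a'::'r'::'.'::e from fun e => rfl] at egz ebz exz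
      simp [egz, ebz, exz]
  · have hsuf : ∀ p : List Char, '.' ∈ p → ¬ p <:+ l := fun p hp hs => hdot (hs.subset hp)
    have hdw : l.reverse.dropWhile (· ≠ '.') = [] := by
      rw [List.dropWhile_eq_nil_iff]
      intro x hx
      have hxl : x ∈ l := List.mem_reverse.1 hx
      simpa using fun he : x = '.' => hdot (he ▸ hxl)
    have hs := pvSplitOnNoDot l hdot
    simp only [List.isSuffixOf_iff_suffix, hs, hdw]
    simp [hsuf ['.','t','a','r','.','g','z'] (by decide), hsuf ['.','t','a','r','.','b','z','2'] (by decide),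
      hsuf ['.','t','a','r','.','x','z'] (by decide)]


-- ===== VERDICT (by name: the statement is the Claim_ definition above) =====
theorem host_extension_py_spec : Claim_equal_host_extension_py := by
  intro token _
  unfold Spec_host_extension_py host_extension_py host_extension_py_alt
  have h := pvMain (PySem.Str.lower token).toList
  simp only [PySem.Str.endswith_eq, PySem.Chars.endswith,
    show (".tar.gz" : String).toList = ['.','t','a','r','.','g','z'] from rfl,
    show (".tar.bz2" : String).toList = ['.','t','a','r','.','b','z','2'] from rfl,
    show (".tar.xz" : String).toList = ['.','t','a','r','.','x','z'] from rfl]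
  exact h
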